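-- pv_equiv track=rewrite | github.com/NOWUM/smartdso | demLib/lat_lon_finder.py | convert_address
-- ===== SOURCE A (Python) =====
-- def convert_address(a: str):
--     a_parts = a.split(' ')
--     convert = True
--     a = ''
--     for part in a_parts:
--         try:
--             num = float(part)
--             a += ' ' + part
--             break
--         except Exception as e:
--             a += ' ' + part
--     # a = a_parts[0] + ' ' + a_parts[1]
--     adr_str = f'{a} 52525 Heinsberg'
--     return adr_str
-- ===== SOURCE B (Python) =====
-- def convert_address(a: str):
--     parts = a.split(' ')
--
--     def is_num(tok):
--         try:
--             float(tok)
--             return True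
--         except Exception:
--             return False
--
--     idx = next((i for i, tok in enumerate(parts) if is_num(tok)), len(parts))
--     return ' ' + ' '.join(parts[:idx + 1]) + ' 52525 Heinsberg'
-- ===== Notes on version B (the rewrite author's own statement) =====
-- stated objective: simpler
-- what changed: A interleaves string accumulation with a try/except break inside one loop; B first locates the boundary (index of the first float-parsable token, defaulting to len(parts)) and then assembles the result in one shot by joining the token slice parts[:idx+1] behind a leading space.
import Mathlib
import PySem

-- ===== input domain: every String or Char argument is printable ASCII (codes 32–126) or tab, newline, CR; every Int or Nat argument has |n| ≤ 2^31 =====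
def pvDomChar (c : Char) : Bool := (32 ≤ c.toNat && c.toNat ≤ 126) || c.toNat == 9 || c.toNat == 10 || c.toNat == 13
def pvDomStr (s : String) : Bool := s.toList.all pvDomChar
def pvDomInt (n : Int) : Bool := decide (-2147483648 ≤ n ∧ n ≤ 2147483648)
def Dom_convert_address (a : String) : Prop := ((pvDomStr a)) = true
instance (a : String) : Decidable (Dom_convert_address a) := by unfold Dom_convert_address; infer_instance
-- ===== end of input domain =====

-- B replaces A's interleaved accumulate-and-break loop by a separate search for the
-- first float-parsable token (findIdx) followed by a slice-and-join (objective: simpler).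


-- ===== PORT A =====
-- A-side helper: does Python's float(token) succeed?  Hand-written port of CPython's
-- float-literal acceptance, exact on the printable-ASCII + tab/newline/CR domain:
-- optional surrounding whitespace, optional sign, then inf/infinity/nan
-- (case-insensitive) or a decimal literal with CPython's underscore rules
-- (each '_' strictly between two digits), at most one '.', at least one digit,
-- and an optional exponent part.
def pvIsDigit (c : Char) : Bool := decide ('0' ≤ c) && decide (c ≤ '9')

def pvUOk : Option Char → List Char → Bool
  | _, [] => true
  | prev, c :: rest =>
    if c = '_' then
      (match prev with | some p => pvIsDigit p | none => false) &&
      (match rest with | d :: _ => pvIsDigit d | [] => false) &&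
      pvUOk (some c) rest
    else pvUOk (some c) rest

def pvMantChar (c : Char) : Bool := pvIsDigit c || c == '_' || c == '.'

def pvMantOk (cs : List Char) : Bool :=
  cs.all pvMantChar && decide (cs.count '.' ≤ 1) && cs.any pvIsDigit && pvUOk none cs

def pvExpOk (cs : List Char) : Bool :=
  !cs.isEmpty && cs.all (fun c => pvIsDigit c || c == '_') && pvUOk none cs

def pvDropSign : List Char → List Char
  | [] => []
  | c :: rest => if c = '+' || c = '-' then rest else c :: rest

def pvFloatOk (cs0 : List Char) : Bool :=
  let cs := pvDropSign (PySem.Chars.strip cs0)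
  let low := cs.map PySem.Chars.lowerChar
  if low = "inf".toList ∨ low = "infinity".toList ∨ low = "nan".toList then true
  else
    let mant := cs.takeWhile pvMantChar
    let rest := cs.drop mant.length
    pvMantOk mant &&
      (match rest with
       | [] => true
       | e :: r => (e == 'e' || e == 'E') && pvExpOk (pvDropSign r))

-- A's for-loop with break, on the token list (strings carried as List Char).
def pvLoopA : List (List Char) → List Char → List Char
  | [], acc => acc
  | p :: rest, acc =>
    if pvFloatOk p then acc ++ ' ' :: p else pvLoopA rest (acc ++ ' ' :: p)

def convert_address (a : String) : String :=
  String.ofList (pvLoopA (PySem.Chars.splitOn a.toList [' ']) [] ++ " 52525 Heinsberg".toList)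

-- ===== PORT B =====
-- B-side helper: the same builtin float(token) test, hand-ported for B as a
-- character-level finite state machine (exact on the same ASCII domain):
-- strip, then drive one state per character.
inductive pvFS : Type
  | start | signed
  | i1 | i2 | inf3 | i4 | i5 | i6 | i7 | inf8
  | n1 | n2 | nan3
  | int | intU | dot | frac0 | frac | fracU
  | exps | expsg | expd | expU
  | dead
deriving DecidableEq, Repr

def pvDispatch (c : Char) : pvFS :=
  if pvIsDigit c then .int
  else if c = '.' then .dot
  else if PySem.Chars.lowerChar c = 'i' then .i1
  else if PySem.Chars.lowerChar c = 'n' then .n1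
  else .dead

def pvStep : pvFS → Char → pvFS
  | .start, c => if c = '+' || c = '-' then .signed else pvDispatch c
  | .signed, c => pvDispatch c
  | .i1, c => if PySem.Chars.lowerChar c = 'n' then .i2 else .dead
  | .i2, c => if PySem.Chars.lowerChar c = 'f' then .inf3 else .dead
  | .inf3, c => if PySem.Chars.lowerChar c = 'i' then .i4 else .dead
  | .i4, c => if PySem.Chars.lowerChar c = 'n' then .i5 else .dead
  | .i5, c => if PySem.Chars.lowerChar c = 'i' then .i6 else .dead
  | .i6, c => if PySem.Chars.lowerChar c = 't' then .i7 else .dead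
  | .i7, c => if PySem.Chars.lowerChar c = 'y' then .inf8 else .dead
  | .inf8, _ => .dead
  | .n1, c => if PySem.Chars.lowerChar c = 'a' then .n2 else .dead
  | .n2, c => if PySem.Chars.lowerChar c = 'n' then .nan3 else .dead
  | .nan3, _ => .dead
  | .int, c =>
      if pvIsDigit c then .int
      else if c = '_' then .intU
      else if c = '.' then .frac0
      else if PySem.Chars.lowerChar c = 'e' then .exps
      else .dead
  | .intU, c => if pvIsDigit c then .int else .dead
  | .dot, c => if pvIsDigit c then .frac else .dead
  | .frac0, c =>
      if pvIsDigit c then .frac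
      else if PySem.Chars.lowerChar c = 'e' then .exps
      else .dead
  | .frac, c =>
      if pvIsDigit c then .frac
      else if c = '_' then .fracU
      else if PySem.Chars.lowerChar c = 'e' then .exps
      else .dead
  | .fracU, c => if pvIsDigit c then .frac else .dead
  | .exps, c =>
      if pvIsDigit c then .expd
      else if c = '+' || c = '-' then .expsg
      else .dead
  | .expsg, c => if pvIsDigit c then .expd else .dead
  | .expd, c =>
      if pvIsDigit c then .expd
      else if c = '_' then .expU
      else .dead
  | .expU, c => if pvIsDigit c then .expd else .dead
  | .dead, _ => .dead

def pvAccepting : pvFS → Bool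
  | .inf3 | .inf8 | .nan3 | .int | .frac0 | .frac | .expd => true
  | _ => false

def pvFloatDFA (cs : List Char) : Bool :=
  pvAccepting ((PySem.Chars.strip cs).foldl pvStep .start)

def convert_address_alt (a : String) : String :=
  let parts := PySem.Chars.splitOn a.toList [' ']
  let idx := parts.findIdx pvFloatDFA
  String.ofList (' ' :: List.intercalate [' '] (parts.take (idx + 1)) ++ " 52525 Heinsberg".toList)

-- ===== PRECONDITION & SPEC =====
def Spec_convert_address (a : String) (out : String) : Prop := out = convert_address_alt a
instance (a : String) (out : String) : Decidable (Spec_convert_address a out) := by unfold Spec_convert_address; infer_instance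

-- ===== CLAIM (what is proved, stated in full; the proofs are below) =====
def Claim_equal_convert_address : Prop := ∀ (a : String), Dom_convert_address a → Spec_convert_address a (convert_address a)

-- ===== LEMMAS AND PROOFS =====

-- Proof-side abbreviation: run the DFA from state s and test acceptance.
def pvAcc (s : pvFS) (cs : List Char) : Bool := pvAccepting (cs.foldl pvStep s)

lemma pvAcc_nil (s : pvFS) : pvAcc s [] = pvAccepting s := rfl

lemma pvAcc_cons (s : pvFS) (c : Char) (r : List Char) :
    pvAcc s (c :: r) = pvAcc (pvStep s c) r := rfl

lemma pv_dead (r : List Char) : pvAcc .dead r = false := by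
  induction r with
  | nil => rfl
  | cons c r ih => rw [pvAcc_cons]; exact ih

-- Char arithmetic helpers -----------------------------------------------------
lemma pv_char_eq_of_toNat {a b : Char} (h : a.toNat = b.toNat) : a = b := by
  apply Char.ext; unfold Char.toNat at h; exact UInt32.toNat_inj.mp h

lemma pv_digit_toNat {c : Char} (h : pvIsDigit c = true) :
    48 ≤ c.toNat ∧ c.toNat ≤ 57 := by
  simp [pvIsDigit] at h
  obtain ⟨h1, h2⟩ := h
  rw [Char.le_def] at h1 h2
  exact ⟨h1, h2⟩

lemma pv_digit_facts {c : Char} (h : pvIsDigit c = true) :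
    c ≠ '.' ∧ c ≠ '_' ∧ PySem.Chars.lowerChar c = c := by
  obtain ⟨h1, h2⟩ := pv_digit_toNat h
  refine ⟨?_, ?_, ?_⟩
  · rintro rfl; exact absurd h1 (by decide)
  · rintro rfl; exact absurd h2 (by decide)
  · have hu : PySem.Chars.isupper c = false := by
      by_cases hu : PySem.Chars.isupper c = true
      · exfalso
        simp only [PySem.Chars.isupper, Bool.and_eq_true, decide_eq_true_eq] at hu
        obtain ⟨a, b⟩ := hu
        rw [Char.le_def] at a
        have ha : (65 : Nat) ≤ c.toNat := a
        omega
      · simpa using hu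
    simp [PySem.Chars.lowerChar, hu]

lemma pv_digit_ne {c d : Char} (h : pvIsDigit c = true) (hd : pvIsDigit d = false) : c ≠ d := by
  rintro rfl; rw [h] at hd; simp at hd

lemma pv_lower_e {c : Char} : PySem.Chars.lowerChar c = 'e' ↔ (c = 'e' ∨ c = 'E') := by
  constructor
  · intro h
    unfold PySem.Chars.lowerChar at h
    by_cases hu : PySem.Chars.isupper c = true
    · rw [if_pos hu] at h
      simp only [PySem.Chars.isupper, Bool.and_eq_true, decide_eq_true_eq] at hu
      obtain ⟨ha, hb⟩ := hu
      rw [Char.le_def] at ha hb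
      have h1 : (65 : Nat) ≤ c.toNat := ha
      have h2 : c.toNat ≤ 90 := hb
      have hv : (Char.ofNat (c.toNat + 32)).toNat = c.toNat + 32 := by
        simp only [Char.ofNat, Nat.isValidChar]
        rw [dif_pos (Or.inl (by omega : c.toNat + 32 < 55296))]
        rfl
      have h3 : c.toNat + 32 = 101 := by
        rw [← hv, h]; decide
      right
      apply pv_char_eq_of_toNat
      have : ('E' : Char).toNat = 69 := by decide
      omega
    · rw [if_neg hu] at h; left; exact h
  · rintro (h | h) <;> subst h <;> decide

-- pvUOk from a digit prev depends only on the prev being a digit.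
lemma pv_uok_prev (m : List Char) : ∀ a b : Option Char,
    (match a with | some p => pvIsDigit p | none => false) =
      (match b with | some p => pvIsDigit p | none => false) →
    pvUOk a m = pvUOk b m := by
  induction m with
  | nil => intro a b _; rfl
  | cons c r ih =>
    intro a b h
    by_cases hc : c = '_'
    · subst hc; simp only [pvUOk, if_pos rfl, h]
    · simp only [pvUOk, if_neg hc]

lemma pv_uok_digit {a : Char} (m : List Char) (h : pvIsDigit a = true) :
    pvUOk (some a) m = pvUOk (some '0') m := by
  apply pv_uok_prev; simp [h]; decide

-- head of dropWhile fails the predicate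
lemma pv_head_dropWhile {p : Char → Bool} : ∀ (l : List Char) (x : Char),
    (l.dropWhile p).head? = some x → p x = false := by
  intro l
  induction l with
  | nil => intro x h; simp at h
  | cons c r ih =>
    intro x h
    by_cases hc : p c = true
    · rw [List.dropWhile_cons, if_pos hc] at h; exact ih x h
    · rw [List.dropWhile_cons, if_neg hc] at h
      simp at h
      subst h
      exact Bool.not_eq_true _ ▸ (by simpa using hc)

-- takeWhile elements satisfy the predicate (all-form)
lemma pv_all_takeWhile (p : Char → Bool) (l : List Char) : (l.takeWhile p).all p = true := by
  rw [List.all_eq_true]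
  intro x hx
  exact List.mem_takeWhile_imp hx

lemma pv_uok_cons_ne (a : Option Char) {c : Char} (h : ¬ c = '_') (r : List Char) :
    pvUOk a (c :: r) = pvUOk (some c) r := by
  simp only [pvUOk, if_neg h]

lemma pv_uok_cons_us (a : Option Char) (r : List Char) :
    pvUOk a ('_' :: r) =
      ((match a with | some p => pvIsDigit p | none => false) &&
        (match r with | d :: _ => pvIsDigit d | [] => false) && pvUOk (some '_') r) := by
  cases r with
  | nil => simp [pvUOk]
  | cons d rest => simp [pvUOk]

-- Exponent part ---------------------------------------------------------------
lemma pv_exp_main : ∀ r : List Char,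
    (pvAcc .expd r = (r.all (fun c => pvIsDigit c || c == '_') && pvUOk (some '0') r))
    ∧ (pvAcc .expU r = (match r with
        | [] => false
        | d :: r' => pvIsDigit d && (r'.all (fun c => pvIsDigit c || c == '_') && pvUOk (some '0') r'))) := by
  intro r
  induction r with
  | nil => exact ⟨rfl, rfl⟩
  | cons c r ih =>
    obtain ⟨ihd, ihu⟩ := ih
    constructor
    · rw [pvAcc_cons]
      by_cases hd : pvIsDigit c = true
      · obtain ⟨-, hus, -⟩ := pv_digit_facts hd
        rw [show pvStep .expd c = .expd from by simp [pvStep, hd], ihd,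
          pv_uok_cons_ne _ hus, pv_uok_digit _ hd]
        simp [hd]
      · by_cases hus : c = '_'
        · subst hus
          rw [show pvStep .expd '_' = .expU from by simp [pvStep, hd], ihu,
            pv_uok_cons_us]
          cases r with
          | nil => simp
          | cons d r' =>
            by_cases hdd : pvIsDigit d = true
            · obtain ⟨-, hus', -⟩ := pv_digit_facts hdd
              rw [pv_uok_cons_ne _ hus', pv_uok_digit _ hdd]
              simp [hdd, Bool.and_assoc, Bool.and_comm]
              intros; decide
            · simp [hdd]
        · rw [show pvStep .expd c = .dead from by simp [pvStep, hd, hus], pv_dead]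
          simp [hd, hus]
    · rw [pvAcc_cons]
      by_cases hd : pvIsDigit c = true
      · rw [show pvStep .expU c = .expd from by simp [pvStep, hd], ihd]
        simp [hd]
      · rw [show pvStep .expU c = .dead from by simp [pvStep, hd], pv_dead]
        simp [hd]

lemma pv_expsg (r : List Char) : pvAcc .expsg r = pvExpOk r := by
  cases r with
  | nil => rfl
  | cons d r' =>
    rw [pvAcc_cons]
    by_cases hd : pvIsDigit d = true
    · obtain ⟨-, hus, -⟩ := pv_digit_facts hd
      rw [show pvStep .expsg d = .expd from by simp [pvStep, hd], (pv_exp_main r').1]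
      simp [pvExpOk, hd, pv_uok_cons_ne _ hus, pv_uok_digit _ hd]
    · by_cases hus : d = '_'
      · subst hus
        rw [show pvStep .expsg '_' = .dead from by simp [pvStep, hd], pv_dead]
        simp [pvExpOk, pv_uok_cons_us]
      · rw [show pvStep .expsg d = .dead from by simp [pvStep, hd], pv_dead]
        simp [pvExpOk, hd, hus]

lemma pv_exps (r : List Char) : pvAcc .exps r = pvExpOk (pvDropSign r) := by
  cases r with
  | nil => rfl
  | cons c r' =>
    by_cases hp : c = '+'
    · subst hp
      rw [pvAcc_cons, show pvStep .exps '+' = .expsg from by simp [pvStep]; decide]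
      rw [pv_expsg]
      simp [pvDropSign]
    · by_cases hm : c = '-'
      · subst hm
        rw [pvAcc_cons, show pvStep .exps '-' = .expsg from by simp [pvStep]; decide]
        rw [pv_expsg]
        simp [pvDropSign]
      · rw [pvAcc_cons, show pvStep .exps c = pvStep .expsg c from by
          simp [pvStep, hp, hm]]
        rw [← pvAcc_cons, pv_expsg]
        rw [show pvDropSign (c :: r') = c :: r' from by simp [pvDropSign, hp, hm]]

-- The tail check after the mantissa, exactly as pvFloatOk spells it.
def pvRestCheck (rest : List Char) : Bool :=
  match rest with
  | [] => true
  | e :: r => (e == 'e' || e == 'E') && pvExpOk (pvDropSign r)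

lemma pv_not_e {x : Char} (he : ¬ PySem.Chars.lowerChar x = 'e') :
    ((x == 'e') || (x == 'E')) = false := by
  have h1 : x ≠ 'e' := by rintro rfl; exact he (by decide)
  have h2 : x ≠ 'E' := by rintro rfl; exact he (by decide)
  simp [h1, h2]

lemma pv_e_beq {x : Char} (he : PySem.Chars.lowerChar x = 'e') :
    ((x == 'e') || (x == 'E')) = true := by
  rcases pv_lower_e.mp he with rfl | rfl <;> decide

lemma pv_mantChar_false {c : Char} (h : pvMantChar c = false) :
    pvIsDigit c = false ∧ ¬ c = '_' ∧ ¬ c = '.' := by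
  simp [pvMantChar] at h
  exact ⟨h.1.1, h.1.2, h.2⟩

-- From an accepting numeric state, a mantissa-boundary suffix is accepted iff the
-- exponent/empty tail check passes.
lemma pv_acc_rest (rest : List Char) (hrest : ∀ x, rest.head? = some x → pvMantChar x = false)
    (s : pvFS) (hacc : pvAccepting s = true)
    (hstep : ∀ c, pvMantChar c = false →
      pvStep s c = (if PySem.Chars.lowerChar c = 'e' then .exps else .dead)) :
    pvAcc s rest = pvRestCheck rest := by
  cases rest with
  | nil => rw [pvAcc_nil, hacc]; rfl
  | cons x r2 =>
    have hx : pvMantChar x = false := hrest x rfl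
    rw [pvAcc_cons, hstep x hx]
    by_cases he : PySem.Chars.lowerChar x = 'e'
    · rw [if_pos he, pv_exps]
      show _ = pvRestCheck (x :: r2)
      simp [pvRestCheck, pv_e_beq he]
    · rw [if_neg he, pv_dead]
      simp [pvRestCheck, pv_not_e he]

-- Mantissa part: joint induction over the six numeric states.
lemma pv_mant_main (rest : List Char)
    (hrest : ∀ x, rest.head? = some x → pvMantChar x = false) :
    ∀ m : List Char, (∀ x ∈ m, pvMantChar x = true) →
      (pvAcc .int (m ++ rest) = (decide (m.count '.' ≤ 1) && pvUOk (some '0') m && pvRestCheck rest))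
      ∧ (pvAcc .frac0 (m ++ rest) = (decide (m.count '.' = 0) && pvUOk (some '.') m && pvRestCheck rest))
      ∧ (pvAcc .frac (m ++ rest) = (decide (m.count '.' = 0) && pvUOk (some '0') m && pvRestCheck rest))
      ∧ (pvAcc .dot (m ++ rest) = (decide (m.count '.' = 0) && m.any pvIsDigit && pvUOk (some '.') m && pvRestCheck rest))
      ∧ (pvAcc .intU (m ++ rest) = (match m with
          | [] => false
          | d :: m' => pvIsDigit d && (decide (m'.count '.' ≤ 1) && pvUOk (some '0') m' && pvRestCheck rest)))
      ∧ (pvAcc .fracU (m ++ rest) = (match m with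
          | [] => false
          | d :: m' => pvIsDigit d && (decide (m'.count '.' = 0) && pvUOk (some '0') m' && pvRestCheck rest))) := by
  intro m
  induction m with
  | nil =>
    intro _
    have hint : pvAcc .int rest = pvRestCheck rest :=
      pv_acc_rest rest hrest .int rfl (by
        intro c hc; obtain ⟨a, b, c2⟩ := pv_mantChar_false hc; simp [pvStep, a, b, c2])
    have hfrac0 : pvAcc .frac0 rest = pvRestCheck rest :=
      pv_acc_rest rest hrest .frac0 rfl (by
        intro c hc; obtain ⟨a, b, c2⟩ := pv_mantChar_false hc; simp [pvStep, a, b, c2])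
    have hfrac : pvAcc .frac rest = pvRestCheck rest :=
      pv_acc_rest rest hrest .frac rfl (by
        intro c hc; obtain ⟨a, b, c2⟩ := pv_mantChar_false hc; simp [pvStep, a, b, c2])
    have hdot : pvAcc .dot rest = false := by
      cases rest with
      | nil => rfl
      | cons x r2 =>
        obtain ⟨a, -, -⟩ := pv_mantChar_false (hrest x rfl)
        rw [pvAcc_cons, show pvStep .dot x = .dead from by simp [pvStep, a], pv_dead]
    have hintU : pvAcc .intU rest = false := by
      cases rest with
      | nil => rfl
      | cons x r2 =>
        obtain ⟨a, -, -⟩ := pv_mantChar_false (hrest x rfl)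
        rw [pvAcc_cons, show pvStep .intU x = .dead from by simp [pvStep, a], pv_dead]
    have hfracU : pvAcc .fracU rest = false := by
      cases rest with
      | nil => rfl
      | cons x r2 =>
        obtain ⟨a, -, -⟩ := pv_mantChar_false (hrest x rfl)
        rw [pvAcc_cons, show pvStep .fracU x = .dead from by simp [pvStep, a], pv_dead]
    refine ⟨?_, ?_, ?_, ?_, ?_, ?_⟩ <;>
      simp [hint, hfrac0, hfrac, hdot, hintU, hfracU, pvUOk]
  | cons d m' ih =>
    intro hm
    have hd : pvMantChar d = true := hm d (List.mem_cons_self ..)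
    obtain ⟨I1, I2, I3, I4, I5, I6⟩ := ih (fun x hx => hm x (List.mem_cons_of_mem _ hx))
    rw [List.cons_append]
    by_cases hdd : pvIsDigit d = true
    -- d is a digit ------------------------------------------------------------
    · obtain ⟨hnp, hnu, -⟩ := pv_digit_facts hdd
      refine ⟨?_, ?_, ?_, ?_, ?_, ?_⟩
      · rw [pvAcc_cons, show pvStep .int d = .int from by simp [pvStep, hdd]; try decide, I1,
          pv_uok_cons_ne _ hnu, pv_uok_digit _ hdd]
        simp [List.count_cons, hnp]
      · rw [pvAcc_cons, show pvStep .frac0 d = .frac from by simp [pvStep, hdd]; try decide, I3,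
          pv_uok_cons_ne _ hnu, pv_uok_digit _ hdd]
        simp [List.count_cons, hnp]
      · rw [pvAcc_cons, show pvStep .frac d = .frac from by simp [pvStep, hdd]; try decide, I3,
          pv_uok_cons_ne _ hnu, pv_uok_digit _ hdd]
        simp [List.count_cons, hnp]
      · rw [pvAcc_cons, show pvStep .dot d = .frac from by simp [pvStep, hdd]; try decide, I3,
          pv_uok_cons_ne _ hnu, pv_uok_digit _ hdd]
        simp [List.count_cons, hnp, hdd]
      · rw [pvAcc_cons, show pvStep .intU d = .int from by simp [pvStep, hdd]; try decide, I1]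
        simp [hdd]
      · rw [pvAcc_cons, show pvStep .fracU d = .frac from by simp [pvStep, hdd]; try decide, I3]
        simp [hdd]
    · by_cases hdu : d = '_'
      -- d is an underscore ----------------------------------------------------
      · subst hdu
        refine ⟨?_, ?_, ?_, ?_, ?_, ?_⟩
        · rw [pvAcc_cons, show pvStep .int '_' = .intU from by simp [pvStep, hdd]; try decide, I5,
            pv_uok_cons_us]
          cases m' with
          | nil => simp
          | cons e m'' =>
            by_cases hde : pvIsDigit e = true
            · obtain ⟨hnp', hnu', -⟩ := pv_digit_facts hde
              have h0 : pvIsDigit '0' = true := by decide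
              rw [pv_uok_cons_ne _ hnu', pv_uok_digit _ hde]
              simp [hde, h0, List.count_cons, hnp', Bool.and_assoc, Bool.and_comm]
            · simp [hde]
        · rw [pvAcc_cons, show pvStep .frac0 '_' = .dead from by simp [pvStep, hdd]; try decide,
            pv_dead, pv_uok_cons_us]
          simp [show pvIsDigit '.' = false from by decide]
        · rw [pvAcc_cons, show pvStep .frac '_' = .fracU from by simp [pvStep, hdd]; try decide, I6,
            pv_uok_cons_us]
          cases m' with
          | nil => simp
          | cons e m'' =>
            by_cases hde : pvIsDigit e = true
            · obtain ⟨hnp', hnu', -⟩ := pv_digit_facts hde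
              have h0 : pvIsDigit '0' = true := by decide
              rw [pv_uok_cons_ne _ hnu', pv_uok_digit _ hde]
              simp [hde, h0, List.count_cons, hnp', Bool.and_assoc, Bool.and_comm]
            · simp [hde]
        · rw [pvAcc_cons, show pvStep .dot '_' = .dead from by simp [pvStep, hdd]; try decide,
            pv_dead, pv_uok_cons_us]
          simp [show pvIsDigit '.' = false from by decide]
        · rw [pvAcc_cons, show pvStep .intU '_' = .dead from by simp [pvStep, hdd]; try decide,
            pv_dead]
          simp [hdd]
        · rw [pvAcc_cons, show pvStep .fracU '_' = .dead from by simp [pvStep, hdd]; try decide,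
            pv_dead]
          simp [hdd]
      · have hdp : d = '.' := by
          have := hd; simp [pvMantChar, hdd, hdu] at this; exact this
        subst hdp
        -- d is the dot --------------------------------------------------------
        refine ⟨?_, ?_, ?_, ?_, ?_, ?_⟩
        · rw [pvAcc_cons, show pvStep .int '.' = .frac0 from by simp [pvStep, hdd]; try decide, I2,
            pv_uok_cons_ne _ (by decide)]
          have hcc : List.count '.' ('.' :: m') = List.count '.' m' + 1 := by simp
          have hcnt : decide (List.count '.' ('.' :: m') ≤ 1) = decide (List.count '.' m' = 0) := by
            rw [decide_eq_decide, hcc]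
            omega
          rw [hcnt]
        · rw [pvAcc_cons, show pvStep .frac0 '.' = .dead from by simp [pvStep, hdd]; try decide,
            pv_dead]
          simp [List.count_cons]
        · rw [pvAcc_cons, show pvStep .frac '.' = .dead from by simp [pvStep, hdd]; try decide,
            pv_dead]
          simp [List.count_cons]
        · rw [pvAcc_cons, show pvStep .dot '.' = .dead from by simp [pvStep, hdd]; try decide,
            pv_dead]
          simp [List.count_cons]
        · rw [pvAcc_cons, show pvStep .intU '.' = .dead from by simp [pvStep, hdd]; try decide,
            pv_dead]
          simp [hdd]
        · rw [pvAcc_cons, show pvStep .fracU '.' = .dead from by simp [pvStep, hdd]; try decide,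
            pv_dead]
          simp [hdd]

-- The inf / nan chains --------------------------------------------------------
lemma pv_inf8 (r : List Char) : pvAcc .inf8 r = decide (r = []) := by
  cases r with
  | nil => rfl
  | cons c r => rw [pvAcc_cons]; simp [pvStep, pv_dead]

lemma pv_nan3 (r : List Char) : pvAcc .nan3 r = decide (r = []) := by
  cases r with
  | nil => rfl
  | cons c r => rw [pvAcc_cons]; simp [pvStep, pv_dead]

lemma pv_i7 (r : List Char) : pvAcc .i7 r = decide (r.map PySem.Chars.lowerChar = "y".toList) := by
  cases r with
  | nil => rfl
  | cons c r =>
    rw [pvAcc_cons]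
    by_cases h : PySem.Chars.lowerChar c = 'y'
    · simp [pvStep, h, pv_inf8]
    · simp [pvStep, h, pv_dead]

lemma pv_i6 (r : List Char) : pvAcc .i6 r = decide (r.map PySem.Chars.lowerChar = "ty".toList) := by
  cases r with
  | nil => rfl
  | cons c r =>
    rw [pvAcc_cons]
    by_cases h : PySem.Chars.lowerChar c = 't'
    · simp [pvStep, h, pv_i7]
    · simp [pvStep, h, pv_dead]

lemma pv_i5 (r : List Char) : pvAcc .i5 r = decide (r.map PySem.Chars.lowerChar = "ity".toList) := by
  cases r with
  | nil => rfl
  | cons c r =>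
    rw [pvAcc_cons]
    by_cases h : PySem.Chars.lowerChar c = 'i'
    · simp [pvStep, h, pv_i6]
    · simp [pvStep, h, pv_dead]

lemma pv_i4 (r : List Char) : pvAcc .i4 r = decide (r.map PySem.Chars.lowerChar = "nity".toList) := by
  cases r with
  | nil => rfl
  | cons c r =>
    rw [pvAcc_cons]
    by_cases h : PySem.Chars.lowerChar c = 'n'
    · simp [pvStep, h, pv_i5]
    · simp [pvStep, h, pv_dead]

lemma pv_inf3 (r : List Char) :
    pvAcc .inf3 r = (decide (r = []) || decide (r.map PySem.Chars.lowerChar = "inity".toList)) := by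
  cases r with
  | nil => rfl
  | cons c r =>
    rw [pvAcc_cons]
    by_cases h : PySem.Chars.lowerChar c = 'i'
    · simp [pvStep, h, pv_i4]
    · simp [pvStep, h, pv_dead]

lemma pv_i2 (r : List Char) :
    pvAcc .i2 r = (decide (r.map PySem.Chars.lowerChar = "f".toList)
      || decide (r.map PySem.Chars.lowerChar = "finity".toList)) := by
  cases r with
  | nil => rfl
  | cons c r =>
    rw [pvAcc_cons]
    by_cases h : PySem.Chars.lowerChar c = 'f'
    · simp [pvStep, h, pv_inf3, List.map_eq_nil_iff]
      rfl
    · simp [pvStep, h, pv_dead]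

lemma pv_i1 (r : List Char) :
    pvAcc .i1 r = (decide (r.map PySem.Chars.lowerChar = "nf".toList)
      || decide (r.map PySem.Chars.lowerChar = "nfinity".toList)) := by
  cases r with
  | nil => rfl
  | cons c r =>
    rw [pvAcc_cons]
    by_cases h : PySem.Chars.lowerChar c = 'n'
    · simp [pvStep, h, pv_i2]
      try rfl
    · simp [pvStep, h, pv_dead]

lemma pv_n2 (r : List Char) : pvAcc .n2 r = decide (r.map PySem.Chars.lowerChar = "n".toList) := by
  cases r with
  | nil => rfl
  | cons c r =>
    rw [pvAcc_cons]
    by_cases h : PySem.Chars.lowerChar c = 'n'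
    · simp [pvStep, h, pv_nan3]
    · simp [pvStep, h, pv_dead]

lemma pv_n1 (r : List Char) : pvAcc .n1 r = decide (r.map PySem.Chars.lowerChar = "an".toList) := by
  cases r with
  | nil => rfl
  | cons c r =>
    rw [pvAcc_cons]
    by_cases h : PySem.Chars.lowerChar c = 'a'
    · simp [pvStep, h, pv_n2]
    · simp [pvStep, h, pv_dead]

-- The post-sign core ----------------------------------------------------------
lemma pv_core (u : List Char) :
    pvAcc .signed u =
      (if u.map PySem.Chars.lowerChar = "inf".toList ∨ u.map PySem.Chars.lowerChar = "infinity".toList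
          ∨ u.map PySem.Chars.lowerChar = "nan".toList then true
       else pvMantOk (u.takeWhile pvMantChar) && pvRestCheck (u.dropWhile pvMantChar)) := by
  have hinf : "inf".toList = ['i', 'n', 'f'] := rfl
  have hinfy : "infinity".toList = ['i', 'n', 'f', 'i', 'n', 'i', 't', 'y'] := rfl
  have hnan : "nan".toList = ['n', 'a', 'n'] := rfl
  rw [hinf, hinfy, hnan]
  cases u with
  | nil =>
    rw [pvAcc_nil]
    simp [pvAccepting, pvMantOk]
  | cons c r =>
    rw [pvAcc_cons, show pvStep .signed c = pvDispatch c from rfl]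
    have hmm := pv_mant_main (r.dropWhile pvMantChar)
      (fun x hx => pv_head_dropWhile r x hx)
      (r.takeWhile pvMantChar) (fun x hx => List.mem_takeWhile_imp hx)
    rw [List.takeWhile_append_dropWhile] at hmm
    obtain ⟨K1, K2, K3, K4, -, -⟩ := hmm
    by_cases hdd : pvIsDigit c = true
    · obtain ⟨hnp, hnu, hlc⟩ := pv_digit_facts hdd
      have hci : c ≠ 'i' := pv_digit_ne hdd (by decide)
      have hcn : c ≠ 'n' := pv_digit_ne hdd (by decide)
      rw [show pvDispatch c = .int from by simp [pvDispatch, hdd], K1]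
      rw [if_neg (by simp [hlc, hci, hcn])]
      rw [List.takeWhile_cons_of_pos (by simp [pvMantChar, hdd]),
        List.dropWhile_cons_of_pos (by simp [pvMantChar, hdd])]
      unfold pvMantOk
      rw [pv_uok_cons_ne _ hnu, pv_uok_digit _ hdd]
      simp [List.count_cons, hnp, hdd, pv_all_takeWhile, pvMantChar,
        Bool.and_assoc, Bool.and_comm]
    · by_cases hdp : c = '.'
      · subst hdp
        rw [show pvDispatch '.' = .dot from by simp [pvDispatch, hdd], K4]
        rw [if_neg (by simp [show PySem.Chars.lowerChar '.' = '.' from by decide])]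
        rw [List.takeWhile_cons_of_pos (by decide),
          List.dropWhile_cons_of_pos (by decide)]
        unfold pvMantOk
        rw [pv_uok_cons_ne _ (by decide)]
        have hcc : List.count '.' ('.' :: r.takeWhile pvMantChar)
            = List.count '.' (r.takeWhile pvMantChar) + 1 := by simp
        have hcnt : decide (List.count '.' ('.' :: r.takeWhile pvMantChar) ≤ 1)
            = decide (List.count '.' (r.takeWhile pvMantChar) = 0) := by
          rw [decide_eq_decide, hcc]; omega
        rw [hcnt]
        simp [show pvIsDigit '.' = false from by decide,
          show pvMantChar '.' = true from by decide, pv_all_takeWhile,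
          Bool.and_assoc, Bool.and_comm]
      · by_cases hli : PySem.Chars.lowerChar c = 'i'
        · rw [show pvDispatch c = .i1 from by simp [pvDispatch, hdd, hdp, hli], pv_i1]
          have hnf : "nf".toList = ['n', 'f'] := rfl
          have hnfy : "nfinity".toList = ['n', 'f', 'i', 'n', 'i', 't', 'y'] := rfl
          rw [hnf, hnfy]
          have hcu : ¬ c = '_' := by rintro rfl; exact absurd hli (by decide)
          by_cases h1 : r.map PySem.Chars.lowerChar = ['n', 'f']
          · rw [if_pos (Or.inl (by simp [hli, h1]))]
            simp [h1]
          · by_cases h2 : r.map PySem.Chars.lowerChar = ['n', 'f', 'i', 'n', 'i', 't', 'y']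
            · rw [if_pos (Or.inr (Or.inl (by simp [hli, h2])))]
              simp [h2]
            · rw [if_neg (by
                simp only [List.map_cons]
                rintro (h | h | h) <;> rw [List.cons.injEq] at h
                · exact h1 h.2
                · exact h2 h.2
                · exact absurd (h.1.symm.trans hli) (by decide))]
              rw [List.takeWhile_cons_of_neg (by simp [pvMantChar, hdd, hdp, hcu])]
              simp [pvMantOk, h1, h2]
        · by_cases hln : PySem.Chars.lowerChar c = 'n'
          · rw [show pvDispatch c = .n1 from by simp [pvDispatch, hdd, hdp, hli, hln], pv_n1]
            have han : "an".toList = ['a', 'n'] := rfl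
            rw [han]
            have hcu : ¬ c = '_' := by rintro rfl; exact absurd hln (by decide)
            by_cases h1 : r.map PySem.Chars.lowerChar = ['a', 'n']
            · rw [if_pos (Or.inr (Or.inr (by simp [hln, h1])))]
              simp [h1]
            · rw [if_neg (by
                simp only [List.map_cons]
                rintro (h | h | h) <;> rw [List.cons.injEq] at h
                · exact hli h.1
                · exact hli h.1
                · exact h1 h.2)]
              rw [List.takeWhile_cons_of_neg (by simp [pvMantChar, hdd, hdp, hcu])]
              simp [pvMantOk, h1]
          · rw [show pvDispatch c = .dead from by simp [pvDispatch, hdd, hdp, hli, hln],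
              pv_dead]
            rw [if_neg (by
              simp only [List.map_cons]
              rintro (h | h | h) <;> rw [List.cons.injEq] at h
              · exact hli h.1
              · exact hli h.1
              · exact hln h.1)]
            by_cases hcu : c = '_'
            · subst hcu
              rw [List.takeWhile_cons_of_pos (by decide)]
              simp [pvMantOk, pv_uok_cons_us]
            · rw [List.takeWhile_cons_of_neg (by simp [pvMantChar, hdd, hdp, hcu])]
              simp [pvMantOk]

lemma pv_start (t : List Char) :
    pvAcc .start t = pvAcc .signed (pvDropSign t) := by
  cases t with
  | nil => rfl
  | cons c r =>
    rw [pvAcc_cons]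
    by_cases h1 : c = '+'
    · subst h1; simp [pvStep, pvDropSign]
    · by_cases h2 : c = '-'
      · subst h2; simp [pvStep, pvDropSign]
      · simp only [pvStep, pvDropSign]
        rw [if_neg (by simp [h1, h2]), if_neg (by simp [h1, h2]), pvAcc_cons]
        simp [pvStep]

lemma pv_drop_takeWhile (p : Char → Bool) (l : List Char) :
    l.drop (l.takeWhile p).length = l.dropWhile p := by
  rw [show l.drop (l.takeWhile p).length
      = ((l.takeWhile p) ++ (l.dropWhile p)).drop (l.takeWhile p).length from by
    rw [List.takeWhile_append_dropWhile]]
  exact List.drop_left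

-- The recognizers agree on every token.
lemma pv_float_eq (cs : List Char) : pvFloatDFA cs = pvFloatOk cs := by
  have h1 : pvFloatDFA cs = pvAcc .start (PySem.Chars.strip cs) := rfl
  rw [h1, pv_start, pv_core,
    ← pv_drop_takeWhile pvMantChar (pvDropSign (PySem.Chars.strip cs))]
  rfl

-- splitOn.go always produces at least one piece.
lemma pv_go_ne_nil (sep : List Char) :
    ∀ (fuel : Nat) (l cur : List Char) (acc : List (List Char)),
      PySem.Chars.splitOn.go sep fuel l cur acc ≠ [] := by
  intro fuel
  induction fuel with
  | zero => intro l cur acc; simp [PySem.Chars.splitOn.go]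
  | succ n ih =>
    intro l cur acc
    cases l with
    | nil => simp [PySem.Chars.splitOn.go]
    | cons c rest =>
      rw [PySem.Chars.splitOn.go]
      split
      · exact ih _ _ _
      · exact ih _ _ _

lemma pv_splitOn_ne_nil (s sep : List Char) : PySem.Chars.splitOn s sep ≠ [] := by
  unfold PySem.Chars.splitOn; exact pv_go_ne_nil _ _ _ _ _

-- A's accumulate-and-break loop equals " " ++ join of the slice up to B's boundary index.
lemma pv_loop_eq_join :
    ∀ (parts : List (List Char)) (acc : List Char), parts ≠ [] →
      pvLoopA parts acc =
        acc ++ ' ' :: PySem.Chars.join [' '] (parts.take (parts.findIdx pvFloatOk + 1)) := by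
  intro parts
  induction parts with
  | nil => intro acc h; exact absurd rfl h
  | cons p rest ih =>
    intro acc _
    by_cases hp : pvFloatOk p = true
    · simp [pvLoopA, List.findIdx_cons, hp, PySem.Chars.join_singleton]
    · cases rest with
      | nil =>
        simp [pvLoopA, List.findIdx_cons, hp, PySem.Chars.join_singleton]
      | cons q rs =>
        have hne : q :: rs ≠ ([] : List (List Char)) := by simp
        rw [pvLoopA.eq_2, if_neg hp, ih _ hne]
        have hp' : pvFloatOk p = false := by simpa using hp
        rw [show (p :: q :: rs).findIdx pvFloatOk = (q :: rs).findIdx pvFloatOk + 1 from by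
          simp [List.findIdx_cons, hp']]
        rw [List.take_succ_cons, List.take_succ_cons, List.take_succ_cons]
        rw [PySem.Chars.join_cons_cons]
        simp

-- ===== VERDICT (by name: the statement is the Claim_ definition above) =====
theorem convert_address_spec : Claim_equal_convert_address := by
  intro a _
  unfold Spec_convert_address convert_address convert_address_alt
  have hfun : pvFloatDFA = pvFloatOk := funext pv_float_eq
  rw [hfun]
  have h := pv_loop_eq_join (PySem.Chars.splitOn a.toList [' ']) []
    (pv_splitOn_ne_nil _ _)
  rw [h]
  have hj : List.intercalate [' '] = PySem.Chars.join [' '] := rfl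
  rw [hj]
  simp
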